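-- pv_equiv track=rewrite | github.com/yangj1211/mo-doc | scripts/migrate_ia.py | remap_path
-- ===== SOURCE A (Python) =====
-- DIR_MOVES = [
--     ("performance-tuning", "operate/performance"),
--     ("getting-started", "get-started"),
--     ("sql-reference", "reference"),
--     ("troubleshooting", "help/troubleshooting"),
--     ("contribution-guide", "contribution-guide"),  # noop,占位防 prefix 误命中
--     ("overview", "concepts"),
--     ("deploy", "operate/deploy"),
--     ("maintain", "operate/maintain"),
--     ("migrate", "operate/migrate"),
--     ("security", "operate/security"),
--     ("test", "operate/test"),
--     ("tutorial", "develop/tutorials"),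
--     ("faqs", "help/faqs"),
-- ]
--
-- FILE_MOVES = [
--     ("glossary.md", "concepts/glossary.md"),
-- ]
--
-- def remap_path(rel: str) -> str:
--     """rel 是相对 source/<lang>/ 的 POSIX 路径。"""
--     rel = rel.replace("\\", "/")
--     if rel == "":
--         return rel
--     for old, new in FILE_MOVES:
--         if rel == old:
--             return new
--     for old, new in DIR_MOVES:
--         if rel == old:
--             return new
--         if rel.startswith(old + "/"):
--             return new + rel[len(old):]
--     return rel
-- ===== SOURCE B (Python) =====
-- DIR_MOVES = [
--     ("performance-tuning", "operate/performance"),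
--     ("getting-started", "get-started"),
--     ("sql-reference", "reference"),
--     ("troubleshooting", "help/troubleshooting"),
--     ("contribution-guide", "contribution-guide"),
--     ("overview", "concepts"),
--     ("deploy", "operate/deploy"),
--     ("maintain", "operate/maintain"),
--     ("migrate", "operate/migrate"),
--     ("security", "operate/security"),
--     ("test", "operate/test"),
--     ("tutorial", "develop/tutorials"),
--     ("faqs", "help/faqs"),
-- ]
--
-- FILE_MOVES = [
--     ("glossary.md", "concepts/glossary.md"),
-- ]
--
-- # A character-level prefix tree (trie) over all rule keys, built once.
-- # Marker key 0 = file rule (must match the whole path), 1 = directory rule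
-- # (must match the whole first segment).
-- TRIE = {}
--
--
-- def _insert(key, kind, val):
--     node = TRIE
--     for ch in key:
--         node = node.setdefault(ch, {})
--     node[kind] = val
--
--
-- for _old, _new in FILE_MOVES:
--     _insert(_old, 0, _new)
-- for _old, _new in DIR_MOVES:
--     _insert(_old, 1, _new)
--
--
-- def remap_path(rel: str) -> str:
--     """rel is a POSIX path relative to source/<lang>/."""
--     rel = rel.replace("\\", "/")
--     if rel == "":
--         return rel
--     node = TRIE
--     i, n = 0, len(rel)
--     while i < n and rel[i] != "/":
--         node = node.get(rel[i])
--         if node is None: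
--             return rel
--         i += 1
--     if i == n and 0 in node:
--         return node[0]
--     if 1 in node:
--         return node[1] + rel[i:]
--     return rel
-- ===== Notes on version B (the rewrite author's own statement) =====
-- stated objective: alternative
-- what changed: Replaces A's rule-by-rule scan (equality plus startswith test per rule) by a character-level prefix tree (trie) built once from all rule keys: the first segment of the path is walked character by character through the trie and the terminal markers at the reached node decide the rewrite.
import Mathlib
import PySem

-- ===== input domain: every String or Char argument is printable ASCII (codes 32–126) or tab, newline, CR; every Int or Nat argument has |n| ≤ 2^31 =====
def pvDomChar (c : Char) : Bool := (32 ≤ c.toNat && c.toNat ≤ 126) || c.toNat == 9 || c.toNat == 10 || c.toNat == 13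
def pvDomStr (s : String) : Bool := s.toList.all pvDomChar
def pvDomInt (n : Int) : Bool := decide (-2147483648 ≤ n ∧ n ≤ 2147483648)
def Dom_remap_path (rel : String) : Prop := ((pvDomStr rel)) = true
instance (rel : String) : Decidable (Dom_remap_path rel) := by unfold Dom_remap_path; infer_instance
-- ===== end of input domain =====

-- B replaces A's rule-by-rule scan (equality + startswith test per rule) by a character-level
-- prefix tree (trie) built once from all rule keys and walked along the first path segment
-- (objective: alternative; same return value everywhere).

-- ===== PORT A =====
def pvDirMoves : List (String × String) :=
  [("performance-tuning", "operate/performance"),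
   ("getting-started", "get-started"),
   ("sql-reference", "reference"),
   ("troubleshooting", "help/troubleshooting"),
   ("contribution-guide", "contribution-guide"),
   ("overview", "concepts"),
   ("deploy", "operate/deploy"),
   ("maintain", "operate/maintain"),
   ("migrate", "operate/migrate"),
   ("security", "operate/security"),
   ("test", "operate/test"),
   ("tutorial", "develop/tutorials"),
   ("faqs", "help/faqs")]

def pvFileMoves : List (String × String) := [("glossary.md", "concepts/glossary.md")]

-- the 'for old, new in FILE_MOVES' loop, returning early on a match
def pvFileLoop : List (String × String) → String → Option String
  | [], _ => none
  | (old, new) :: rest, rel => if rel == old then some new else pvFileLoop rest rel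

-- the 'for old, new in DIR_MOVES' loop, returning early on a match
def pvDirLoop : List (String × String) → String → Option String
  | [], _ => none
  | (old, new) :: rest, rel =>
    if rel == old then some new
    else if PySem.Str.startswith rel (old ++ "/") then
      some (new ++ PySem.Str.slice rel (some (PySem.Str.len old)) none)
    else pvDirLoop rest rel

def remap_path (rel : String) : String :=
  let rel := PySem.Str.replace rel "\\" "/"
  if rel == "" then rel
  else
    match pvFileLoop pvFileMoves rel with
    | some new => new
    | none =>
      match pvDirLoop pvDirMoves rel with
      | some r => r
      | none => rel

-- ===== PORT B =====
-- the nested-dict trie of Source B: at each node, marker 0 = file rule, marker 1 = dir rule,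
-- and the char-keyed child dict (insertion order preserved, only lookup is used)
mutual
inductive PvTrie where
  | mk : Option String → Option String → PvEdges → PvTrie
inductive PvEdges where
  | nil : PvEdges
  | cons : Char → PvTrie → PvEdges → PvEdges
end

def pvFileVal : PvTrie → Option String | .mk f _ _ => f
def pvDirVal : PvTrie → Option String | .mk _ d _ => d
def pvChildren : PvTrie → PvEdges | .mk _ _ es => es
def pvEmptyNode : PvTrie := .mk none none .nil

-- node.get(ch)
def pvEdgesGet : PvEdges → Char → Option PvTrie
  | .nil, _ => none
  | .cons c t rest, ch => if ch = c then some t else pvEdgesGet rest ch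

-- dict write node[ch] = t (overwrite in place, append if new)
def pvEdgesSet : PvEdges → Char → PvTrie → PvEdges
  | .nil, ch, t => .cons ch t .nil
  | .cons c t0 rest, ch, t => if ch = c then .cons c t rest else .cons c t0 (pvEdgesSet rest ch t)

-- _insert: walk/create nodes along the key's chars, set the marker at the end
def pvTrieInsert : PvTrie → List Char → Nat → String → PvTrie
  | .mk f d es, [], kind, v => if kind = 0 then .mk (some v) d es else .mk f (some v) es
  | .mk f d es, c :: cs, kind, v =>
      let child := (pvEdgesGet es c).getD pvEmptyNode
      .mk f d (pvEdgesSet es c (pvTrieInsert child cs kind v))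

-- the module-level build loops over FILE_MOVES then DIR_MOVES
def pvTrie : PvTrie :=
  pvDirMoves.foldl (fun t p => pvTrieInsert t p.1.toList 1 p.2)
    (pvFileMoves.foldl (fun t p => pvTrieInsert t p.1.toList 0 p.2) pvEmptyNode)

-- the 'while i < n and rel[i] != "/"' loop; returns the reached node and rel[i:] (as chars),
-- none = the 'return rel' inside the loop
def pvWalk : PvTrie → List Char → Option (PvTrie × List Char)
  | t, [] => some (t, [])
  | t, c :: cs =>
    if c = '/' then some (t, c :: cs)
    else
      match pvEdgesGet (pvChildren t) c with
      | none => none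
      | some nd => pvWalk nd cs

def remap_path_alt (rel : String) : String :=
  let rel := PySem.Str.replace rel "\\" "/"
  if rel == "" then rel
  else
    match pvWalk pvTrie rel.toList with
    | none => rel
    | some (node, rest) =>
      -- 'if i == n and 0 in node: return node[0]' (rest = [] ↔ i == n)
      match (if rest = [] then pvFileVal node else none) with
      | some v => v
      | none =>
        -- 'if 1 in node: return node[1] + rel[i:]'; String.ofList rest is rel[i:] (0 ≤ i ≤ n, exact)
        match pvDirVal node with
        | some v => v ++ String.ofList rest
        | none => rel

-- ===== PRECONDITION & SPEC =====
def Spec_remap_path (rel : String) (out : String) : Prop := out = remap_path_alt rel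
instance (rel : String) (out : String) : Decidable (Spec_remap_path rel out) := by unfold Spec_remap_path; infer_instance

-- ===== CLAIM =====
def Claim_equal_remap_path : Prop := ∀ (rel : String), Dom_remap_path rel → Spec_remap_path rel (remap_path rel)

-- ===== LEMMAS AND PROOFS =====

-- A-side characterization: both loops are association-list lookups on the first segment
def pvHead (rel : String) : String := String.ofList (rel.toList.takeWhile (fun c => c != '/'))
def pvDirMap : PySem.Dict String String := { items := pvDirMoves }
def pvFileMap : PySem.Dict String String := { items := pvFileMoves }

theorem pvDropWhile_head_false {p : Char → Bool} (l : List Char) (c : Char) (u : List Char)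
    (h : l.dropWhile p = c :: u) : p c = false := by
  induction l with
  | nil => simp at h
  | cons a t ih =>
    by_cases hp : p a
    · rw [List.dropWhile_cons_of_pos hp] at h; exact ih h
    · rw [List.dropWhile_cons_of_neg hp] at h
      cases h; simpa using hp

theorem pvHead_toList (s : String) :
    (pvHead s).toList = s.toList.takeWhile (fun c => c != '/') := by
  unfold pvHead; exact String.toList_ofList

theorem pvFileLoop_eq (s : String) : pvFileLoop pvFileMoves s = pvFileMap.get? s := by
  by_cases h : s = "glossary.md"
  · subst h; decide
  · have h1 : (s == "glossary.md") = false := beq_eq_false_iff_ne.mpr h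
    have h2 : ("glossary.md" == s) = false := beq_eq_false_iff_ne.mpr (Ne.symm h)
    simp only [pvFileLoop, pvFileMoves, pvFileMap, PySem.Dict.get?_mk_cons, h1, h2,
      Bool.false_eq_true, if_false]
    simp [PySem.Dict.get?]

theorem pvSlice_toList (s : String) (n : Nat) :
    (PySem.Str.slice s (some (n : Int)) none).toList = s.toList.drop n := by
  rw [PySem.Str.toList_slice, PySem.Chars.slice_eq_listSlice, PySem.List.slice_from_natCast]

theorem pvDirLoop_eq (ms : List (String × String)) (s : String)
    (hk : ∀ p ∈ ms, p.1.toList.all (fun c => c != '/') = true) :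
    pvDirLoop ms s =
      (PySem.Dict.get? { items := ms } (pvHead s)).map
        (fun new => new ++ PySem.Str.slice s (some (PySem.Str.len (pvHead s))) none) := by
  induction ms with
  | nil => simp [pvDirLoop, PySem.Dict.get?]
  | cons pr rest ih =>
    obtain ⟨o, nw⟩ := pr
    have ho : ∀ c ∈ o.toList, (c != '/') = true := by
      simpa [List.all_eq_true] using hk (o, nw) List.mem_cons_self
    have htko : o.toList.takeWhile (fun c => c != '/') = o.toList :=
      List.takeWhile_eq_self_iff.mpr ho
    by_cases h1 : s = o
    · subst h1
      have hhead : pvHead s = s := by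
        rw [← String.toList_inj, pvHead_toList, htko]
      have hnil : PySem.Str.slice s (some ((s.length : Nat) : Int)) none = "" := by
        rw [← String.toList_inj, pvSlice_toList]
        simp
      simp [pvDirLoop, PySem.Dict.get?_mk_cons, hhead, hnil]
    · by_cases h2 : PySem.Str.startswith s (o ++ "/") = true
      · have hpre : (o.toList ++ ['/']) <+: s.toList := by
          have hh := h2
          rw [PySem.Str.startswith_eq, String.toList_append] at hh
          have h' := (PySem.Chars.startswith_iff _ _).mp hh
          simpa using h'
        obtain ⟨u, hu⟩ := hpre
        rw [List.append_assoc] at hu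
        have htk : s.toList.takeWhile (fun c => c != '/') = o.toList := by
          rw [← hu, List.takeWhile_append, htko]
          simp
        have hhead : pvHead s = o := by
          rw [← String.toList_inj, pvHead_toList, htk]
        have hbeq : (s == o) = false := beq_eq_false_iff_ne.mpr h1
        simp only [pvDirLoop, hbeq, Bool.false_eq_true, if_false, h2, if_true,
          PySem.Dict.get?_mk_cons, hhead, beq_self_eq_true, Option.map_some]
      · have hne : (o == pvHead s) = false := by
          apply beq_eq_false_iff_ne.mpr
          intro heq
          have htk : o.toList = s.toList.takeWhile (fun c => c != '/') := by
            rw [heq, pvHead_toList]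
          have hsplit := List.takeWhile_append_dropWhile
            (p := fun c => c != '/') (l := s.toList)
          cases hdw : s.toList.dropWhile (fun c => c != '/') with
          | nil =>
            apply h1
            rw [← String.toList_inj, ← hsplit, hdw, List.append_nil, ← htk]
          | cons c u =>
            have hc := pvDropWhile_head_false s.toList c u hdw
            have hc' : c = '/' := by simpa using hc
            apply h2
            rw [PySem.Str.startswith_eq, String.toList_append]
            apply (PySem.Chars.startswith_iff _ _).mpr
            refine ⟨u, ?_⟩
            have hs2 : s.toList = o.toList ++ '/' :: u := by
              rw [← hsplit, hdw, ← htk, hc']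
            simp [hs2]
        have hbeq : (s == o) = false := beq_eq_false_iff_ne.mpr h1
        have h2' : PySem.Str.startswith s (o ++ "/") = false := by
          simpa using h2
        simp only [pvDirLoop, hbeq, Bool.false_eq_true, if_false, h2', PySem.Dict.get?_mk_cons, hne]
        exact ih (fun p hp => hk p (List.mem_cons_of_mem _ hp))

-- B-side characterization: exact descent, and marker semantics of the built trie
def pvFind : PvTrie → List Char → Option PvTrie
  | t, [] => some t
  | t, c :: cs =>
    match pvEdgesGet (pvChildren t) c with
    | none => none
    | some nd => pvFind nd cs

def pvFsem (t : PvTrie) (h : List Char) : Option String := (pvFind t h).bind pvFileVal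
def pvDsem (t : PvTrie) (h : List Char) : Option String := (pvFind t h).bind pvDirVal

theorem pvEdgesGet_set : ∀ (es : PvEdges) (c c' : Char) (t : PvTrie),
    pvEdgesGet (pvEdgesSet es c t) c' = if c' = c then some t else pvEdgesGet es c'
  | .nil, c, c', t => by
      by_cases h : c' = c <;> simp [pvEdgesSet, pvEdgesGet, h]
  | .cons c0 t0 rest, c, c', t => by
      by_cases h0 : c = c0
      · subst h0; by_cases h : c' = c <;> simp [pvEdgesSet, pvEdgesGet, h]
      · by_cases h : c' = c
        · subst h
          simp [pvEdgesSet, if_neg h0, pvEdgesGet, if_neg h0, pvEdgesGet_set rest]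
        · by_cases h1 : c' = c0
          · subst h1
            simp [pvEdgesSet, pvEdgesGet, h0, h]
          · simp [pvEdgesSet, pvEdgesGet, h0, h, h1, pvEdgesGet_set rest]

theorem pvFsem_empty (h : List Char) : pvFsem pvEmptyNode h = none := by
  cases h <;> simp [pvFsem, pvFind, pvEmptyNode, pvChildren, pvEdgesGet, pvFileVal]

theorem pvDsem_empty (h : List Char) : pvDsem pvEmptyNode h = none := by
  cases h <;> simp [pvDsem, pvFind, pvEmptyNode, pvChildren, pvEdgesGet, pvDirVal]

theorem pvFsem_node_cons (f d : Option String) (es : PvEdges) (c : Char) (hs : List Char) :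
    pvFsem (.mk f d es) (c :: hs) = (pvEdgesGet es c).bind (fun nd => pvFsem nd hs) := by
  cases hg : pvEdgesGet es c <;> simp [pvFsem, pvFind, pvChildren, hg]

theorem pvDsem_node_cons (f d : Option String) (es : PvEdges) (c : Char) (hs : List Char) :
    pvDsem (.mk f d es) (c :: hs) = (pvEdgesGet es c).bind (fun nd => pvDsem nd hs) := by
  cases hg : pvEdgesGet es c <;> simp [pvDsem, pvFind, pvChildren, hg]

theorem pvFsem_insert (ks : List Char) (t : PvTrie) (k : Nat) (v : String) (h : List Char) :
    pvFsem (pvTrieInsert t ks k v) h = if k = 0 ∧ h = ks then some v else pvFsem t h := by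
  induction ks generalizing t h with
  | nil =>
    obtain ⟨f, d, es⟩ := t
    cases h with
    | nil =>
      by_cases hk : k = 0 <;> simp [pvTrieInsert, hk, pvFsem, pvFind, pvFileVal]
    | cons c cs =>
      by_cases hk : k = 0 <;>
        simp [pvTrieInsert, hk, pvFsem_node_cons]
  | cons c cs ih =>
    obtain ⟨f, d, es⟩ := t
    cases h with
    | nil => simp [pvTrieInsert, pvFsem, pvFind, pvFileVal]
    | cons c' hs =>
      rw [show pvTrieInsert (.mk f d es) (c :: cs) k v
            = .mk f d (pvEdgesSet es c (pvTrieInsert ((pvEdgesGet es c).getD pvEmptyNode) cs k v))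
          from rfl,
        pvFsem_node_cons, pvEdgesGet_set, pvFsem_node_cons]
      by_cases hc : c' = c
      · subst hc
        rw [if_pos rfl, Option.bind_some, ih]
        by_cases hz : k = 0 ∧ hs = cs
        · simp [hz]
        · rw [if_neg hz, if_neg (by simpa using hz)]
          cases hg : pvEdgesGet es c' <;> simp [hg, pvFsem_empty]
      · rw [if_neg hc, if_neg (by simp [hc])]

theorem pvDsem_insert (ks : List Char) (t : PvTrie) (k : Nat) (v : String) (h : List Char) :
    pvDsem (pvTrieInsert t ks k v) h = if k ≠ 0 ∧ h = ks then some v else pvDsem t h := by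
  induction ks generalizing t h with
  | nil =>
    obtain ⟨f, d, es⟩ := t
    cases h with
    | nil =>
      by_cases hk : k = 0 <;> simp [pvTrieInsert, hk, pvDsem, pvFind, pvDirVal]
    | cons c cs =>
      by_cases hk : k = 0 <;>
        simp [pvTrieInsert, hk, pvDsem_node_cons]
  | cons c cs ih =>
    obtain ⟨f, d, es⟩ := t
    cases h with
    | nil => simp [pvTrieInsert, pvDsem, pvFind, pvDirVal]
    | cons c' hs =>
      rw [show pvTrieInsert (.mk f d es) (c :: cs) k v
            = .mk f d (pvEdgesSet es c (pvTrieInsert ((pvEdgesGet es c).getD pvEmptyNode) cs k v))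
          from rfl,
        pvDsem_node_cons, pvEdgesGet_set, pvDsem_node_cons]
      by_cases hc : c' = c
      · subst hc
        rw [if_pos rfl, Option.bind_some, ih]
        by_cases hz : k ≠ 0 ∧ hs = cs
        · simp [hz]
        · rw [if_neg hz, if_neg (by simpa using hz)]
          cases hg : pvEdgesGet es c' <;> simp [hg, pvDsem_empty]
      · rw [if_neg hc, if_neg (by simp [hc])]

-- the walk loop is an exact descent along the first segment, carrying the rest
theorem pvWalk_eq (t : PvTrie) (cs : List Char) :
    pvWalk t cs = (pvFind t (cs.takeWhile (fun c => c != '/'))).map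
      (fun nd => (nd, cs.dropWhile (fun c => c != '/'))) := by
  induction cs generalizing t with
  | nil => simp [pvWalk, pvFind]
  | cons c rest ih =>
    by_cases hc : c = '/'
    · subst hc
      simp [pvWalk, pvFind, List.takeWhile_cons, List.dropWhile_cons]
    · have hne : (c != '/') = true := by simpa using hc
      cases hg : pvEdgesGet (pvChildren t) c with
      | none => simp [pvWalk, if_neg hc, hne, pvFind, hg]
      | some nd => simp [pvWalk, if_neg hc, hne, pvFind, hg, ih nd]

theorem pvFsem_pvTrie (h : List Char) :
    pvFsem pvTrie h = PySem.Dict.get? pvFileMap (String.ofList h) := by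
  by_cases hg : h = "glossary.md".toList
  · subst hg; decide
  · have hg' : h ≠ ['g', 'l', 'o', 's', 's', 'a', 'r', 'y', '.', 'm', 'd'] := by
      intro e; exact hg (by rw [e]; decide)
    have h1 : pvFsem pvTrie h = none := by
      simp only [pvTrie, pvDirMoves, pvFileMoves, List.foldl]
      simp only [pvFsem_insert]
      simp [hg, hg', pvFsem_empty]
    have h2 : ("glossary.md" == String.ofList h) = false := by
      apply beq_eq_false_iff_ne.mpr
      intro he
      apply hg
      rw [← String.toList_ofList (l := h), ← he]
    rw [h1]
    simp [pvFileMap, pvFileMoves, PySem.Dict.get?, h2]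

theorem pvDsem_pvTrie (h : List Char) :
    pvDsem pvTrie h = PySem.Dict.get? pvDirMap (String.ofList h) := by
  by_cases k1 : h = "performance-tuning".toList
  · subst k1; decide
  by_cases k2 : h = "getting-started".toList
  · subst k2; decide
  by_cases k3 : h = "sql-reference".toList
  · subst k3; decide
  by_cases k4 : h = "troubleshooting".toList
  · subst k4; decide
  by_cases k5 : h = "contribution-guide".toList
  · subst k5; decide
  by_cases k6 : h = "overview".toList
  · subst k6; decide
  by_cases k7 : h = "deploy".toList
  · subst k7; decide
  by_cases k8 : h = "maintain".toList
  · subst k8; decide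
  by_cases k9 : h = "migrate".toList
  · subst k9; decide
  by_cases k10 : h = "security".toList
  · subst k10; decide
  by_cases k11 : h = "test".toList
  · subst k11; decide
  by_cases k12 : h = "tutorial".toList
  · subst k12; decide
  by_cases k13 : h = "faqs".toList
  · subst k13; decide
  have k1' : h ≠ ['p', 'e', 'r', 'f', 'o', 'r', 'm', 'a', 'n', 'c', 'e', '-', 't', 'u', 'n', 'i', 'n', 'g'] := by
    intro e; exact k1 (by rw [e]; decide)
  have k2' : h ≠ ['g', 'e', 't', 't', 'i', 'n', 'g', '-', 's', 't', 'a', 'r', 't', 'e', 'd'] := by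
    intro e; exact k2 (by rw [e]; decide)
  have k3' : h ≠ ['s', 'q', 'l', '-', 'r', 'e', 'f', 'e', 'r', 'e', 'n', 'c', 'e'] := by
    intro e; exact k3 (by rw [e]; decide)
  have k4' : h ≠ ['t', 'r', 'o', 'u', 'b', 'l', 'e', 's', 'h', 'o', 'o', 't', 'i', 'n', 'g'] := by
    intro e; exact k4 (by rw [e]; decide)
  have k5' : h ≠ ['c', 'o', 'n', 't', 'r', 'i', 'b', 'u', 't', 'i', 'o', 'n', '-', 'g', 'u', 'i', 'd', 'e'] := by
    intro e; exact k5 (by rw [e]; decide)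
  have k6' : h ≠ ['o', 'v', 'e', 'r', 'v', 'i', 'e', 'w'] := by
    intro e; exact k6 (by rw [e]; decide)
  have k7' : h ≠ ['d', 'e', 'p', 'l', 'o', 'y'] := by
    intro e; exact k7 (by rw [e]; decide)
  have k8' : h ≠ ['m', 'a', 'i', 'n', 't', 'a', 'i', 'n'] := by
    intro e; exact k8 (by rw [e]; decide)
  have k9' : h ≠ ['m', 'i', 'g', 'r', 'a', 't', 'e'] := by
    intro e; exact k9 (by rw [e]; decide)
  have k10' : h ≠ ['s', 'e', 'c', 'u', 'r', 'i', 't', 'y'] := by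
    intro e; exact k10 (by rw [e]; decide)
  have k11' : h ≠ ['t', 'e', 's', 't'] := by
    intro e; exact k11 (by rw [e]; decide)
  have k12' : h ≠ ['t', 'u', 't', 'o', 'r', 'i', 'a', 'l'] := by
    intro e; exact k12 (by rw [e]; decide)
  have k13' : h ≠ ['f', 'a', 'q', 's'] := by
    intro e; exact k13 (by rw [e]; decide)
  have h1 : pvDsem pvTrie h = none := by
    simp only [pvTrie, pvDirMoves, pvFileMoves, List.foldl]
    simp only [pvDsem_insert]
    simp [k1, k2, k3, k4, k5, k6, k7, k8, k9, k10, k11, k12, k13,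
      k1', k2', k3', k4', k5', k6', k7', k8', k9', k10', k11', k12', k13', pvDsem_empty]
  have hb : ∀ key : String, h ≠ key.toList → (key == String.ofList h) = false := by
    intro key hne
    apply beq_eq_false_iff_ne.mpr
    intro he
    apply hne
    rw [← String.toList_ofList (l := h), ← he]
  rw [h1]
  simp [pvDirMap, pvDirMoves, PySem.Dict.get?,
    hb _ k1, hb _ k2, hb _ k3, hb _ k4, hb _ k5, hb _ k6, hb _ k7, hb _ k8, hb _ k9,
    hb _ k10, hb _ k11, hb _ k12, hb _ k13]

-- ===== VERDICT =====
theorem remap_path_spec : Claim_equal_remap_path := by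
  intro rel _
  unfold Spec_remap_path
  simp only [remap_path, remap_path_alt]
  generalize PySem.Str.replace rel "\\" "/" = s
  by_cases h0 : (s == "") = true
  · simp [h0]
  · have h0' : (s == "") = false := by simpa using h0
    simp only [h0', Bool.false_eq_true, if_false]
    have hk : ∀ p ∈ pvDirMoves, p.1.toList.all (fun c => c != '/') = true := by decide
    rw [pvFileLoop_eq, pvDirLoop_eq pvDirMoves s hk,
      show ({ items := pvDirMoves } : PySem.Dict String String) = pvDirMap from rfl, pvWalk_eq]
    set htl := s.toList.takeWhile (fun c => c != '/') with hhtl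
    set rest := s.toList.dropWhile (fun c => c != '/') with hrest
    have hsplit : s.toList = htl ++ rest := (List.takeWhile_append_dropWhile).symm
    have hheadeq : pvHead s = String.ofList htl := by unfold pvHead; rfl
    have hlenN : (pvHead s).length = htl.length := by
      rw [← String.length_toList, pvHead_toList]
    have hslice : PySem.Str.slice s (some (((pvHead s).length : Nat) : Int)) none
        = String.ofList rest := by
      rw [← String.toList_inj, pvSlice_toList, String.toList_ofList, hlenN, hsplit]
      simp
    -- if rest is nonempty, s contains '/', so the FILE_MOVES lookup misses
    have hfd_slash : rest ≠ [] → PySem.Dict.get? pvFileMap s = none := by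
      intro hne
      cases hr : rest with
      | nil => exact absurd hr hne
      | cons c u =>
        have hc : c = '/' := by
          have := pvDropWhile_head_false s.toList c u (hrest ▸ hr)
          simpa using this
        have hmem : '/' ∈ s.toList := by
          rw [hsplit, hr, hc]; simp
        have hne2 : ("glossary.md" == s) = false := by
          apply beq_eq_false_iff_ne.mpr
          intro he
          rw [← he] at hmem
          revert hmem; decide
        simp [pvFileMap, pvFileMoves, PySem.Dict.get?, hne2]
    cases hfind : pvFind pvTrie htl with
    | none =>
      have hdd : PySem.Dict.get? pvDirMap (pvHead s) = none := by
        rw [hheadeq, ← pvDsem_pvTrie, pvDsem, hfind]; rfl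
      have hfd : PySem.Dict.get? pvFileMap s = none := by
        by_cases hr : rest = []
        · have hs : s = String.ofList htl := by
            rw [← String.toList_inj, String.toList_ofList, hsplit, hr, List.append_nil]
          rw [hs, ← pvFsem_pvTrie, pvFsem, hfind]; rfl
        · exact hfd_slash hr
      simp [hfd, hdd]
    | some node =>
      have hdd : PySem.Dict.get? pvDirMap (pvHead s) = pvDirVal node := by
        rw [hheadeq, ← pvDsem_pvTrie, pvDsem, hfind]; rfl
      by_cases hr : rest = []
      · have hs : s = String.ofList htl := by
          rw [← String.toList_inj, String.toList_ofList, hsplit, hr, List.append_nil]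
        have hfd : PySem.Dict.get? pvFileMap s = pvFileVal node := by
          rw [hs, ← pvFsem_pvTrie, pvFsem, hfind]; rfl
        rw [hfd, hdd]
        simp only [Option.map_some, if_pos hr]
        cases pvFileVal node with
        | some v => rfl
        | none =>
          cases pvDirVal node with
          | some v => simp [hslice]
          | none => rfl
      · have hfd : PySem.Dict.get? pvFileMap s = none := hfd_slash hr
        rw [hfd, hdd]
        simp only [Option.map_some, if_neg hr]
        cases pvDirVal node with
        | some v => simp [hslice]
        | none => rfl
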